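-- pv_equiv track=rewrite | github.com/Aasthaengg/IBMdataset | Python_codes/p03488/s657867357.py | solve
-- ===== SOURCE A (Python) =====
-- def solve(a,dp,G):
--     for i in range(len(a)):
--         tmp=set()
--         for j in dp:
--             tmp.add(j-a[i])
--             tmp.add(j+a[i])
--         dp=tmp
--     if G in dp:
--         return True
--     else:
--         return False
-- ===== SOURCE B (Python) =====
-- def solve(a, dp, G):
--     offs = {0}
--     for x in a:
--         offs = {o + x for o in offs} | {o - x for o in offs}
--     return any(G - j in offs for j in dp)
-- ===== Notes on version B (the rewrite author's own statement) =====
-- stated objective: faster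
-- what changed: Instead of propagating the whole start set dp through every step, B builds the set of reachable offsets from 0 over a once and then scans dp checking G - j membership (translation invariance), shrinking the per-step set by a factor of |dp| and replacing per-element .add calls with bulk set comprehensions/union.
import Mathlib
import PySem

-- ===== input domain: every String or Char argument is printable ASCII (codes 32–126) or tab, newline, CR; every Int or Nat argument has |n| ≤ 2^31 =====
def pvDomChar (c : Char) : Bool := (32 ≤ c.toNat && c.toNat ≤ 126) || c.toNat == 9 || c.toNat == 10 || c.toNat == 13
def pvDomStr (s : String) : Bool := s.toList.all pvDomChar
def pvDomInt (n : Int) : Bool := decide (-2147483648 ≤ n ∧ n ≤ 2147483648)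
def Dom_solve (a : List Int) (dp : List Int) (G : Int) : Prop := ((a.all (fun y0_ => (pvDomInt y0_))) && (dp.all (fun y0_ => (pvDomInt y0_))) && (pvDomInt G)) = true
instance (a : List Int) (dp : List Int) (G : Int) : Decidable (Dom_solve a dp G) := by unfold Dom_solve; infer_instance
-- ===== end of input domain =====

-- B builds the reachable-offset set from 0 once and scans dp for G - j, instead of
-- propagating the whole start set through every step (alternative decomposition).

-- ===== PORT A =====
-- for j in dp: tmp.add(j-a[i]); tmp.add(j+a[i])
def solveStep (dp : List Int) (x : Int) : PySem.Set Int :=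
  dp.foldl (fun t j => PySem.Set.add (PySem.Set.add t (j - x)) (j + x)) PySem.Set.empty

def solve (a : List Int) (dp : List Int) (G : Int) : Bool :=
  let final := a.foldl (fun d x => solveStep d x) dp
  decide (G ∈ final)

-- ===== PORT B =====
def solve_alt (a : List Int) (dp : List Int) (G : Int) : Bool :=
  let offs := a.foldl
    (fun offs x =>
      PySem.Set.union (PySem.Set.ofList (offs.map (fun o => o + x))) (offs.map (fun o => o - x)))
    (PySem.Set.ofList [0])
  dp.any (fun j => decide ((G - j) ∈ offs))

-- ===== PRECONDITION & SPEC =====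
def Spec_solve (a : List Int) (dp : List Int) (G : Int) (out : Bool) : Prop := out = solve_alt a dp G
instance (a : List Int) (dp : List Int) (G : Int) (out : Bool) : Decidable (Spec_solve a dp G out) := by unfold Spec_solve; infer_instance

-- ===== CLAIM (what is proved, stated in full; the proofs are below) =====
def Claim_equal_solve : Prop := ∀ (a : List Int) (dp : List Int) (G : Int), Dom_solve a dp G → Spec_solve a dp G (solve a dp G)

-- ===== LEMMAS AND PROOFS =====

/-- `m` is reachable from `j` by applying `±x` for each `x` in `a`, in order. -/
def reach : List Int → Int → Int → Prop
  | [], j, m => m = j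
  | x :: rest, j, m => reach rest (j - x) m ∨ reach rest (j + x) m

theorem mem_solveStep (dp : List Int) (x m : Int) :
    m ∈ solveStep dp x ↔ ∃ j ∈ dp, m = j - x ∨ m = j + x := by
  unfold solveStep
  suffices h : ∀ (t : PySem.Set Int),
      m ∈ dp.foldl (fun t j => PySem.Set.add (PySem.Set.add t (j - x)) (j + x)) t ↔
      m ∈ t ∨ ∃ j ∈ dp, m = j - x ∨ m = j + x by
    simpa [PySem.Set.empty] using h PySem.Set.empty
  induction dp with
  | nil => simp
  | cons j rest ih =>
    intro t
    simp only [List.foldl_cons, ih, PySem.Set.mem_add, List.mem_cons]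
    constructor
    · rintro (((h | h) | h) | ⟨k, hk, h⟩)
      · exact Or.inl h
      · exact Or.inr ⟨j, Or.inl rfl, Or.inl h⟩
      · exact Or.inr ⟨j, Or.inl rfl, Or.inr h⟩
      · exact Or.inr ⟨k, Or.inr hk, h⟩
    · rintro (h | ⟨k, (rfl | hk), h⟩)
      · exact Or.inl (Or.inl (Or.inl h))
      · rcases h with h | h
        · exact Or.inl (Or.inl (Or.inr h))
        · exact Or.inl (Or.inr h)
      · exact Or.inr ⟨k, hk, h⟩

theorem mem_foldl_solveStep (a : List Int) (dp : List Int) (m : Int) :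
    m ∈ a.foldl (fun d x => solveStep d x) dp ↔ ∃ j ∈ dp, reach a j m := by
  induction a generalizing dp with
  | nil => simp [reach]
  | cons x rest ih =>
    rw [List.foldl_cons, ih]
    constructor
    · rintro ⟨k, hk, hr⟩
      rcases (mem_solveStep dp x k).1 hk with ⟨j, hj, rfl | rfl⟩
      · exact ⟨j, hj, Or.inl hr⟩
      · exact ⟨j, hj, Or.inr hr⟩
    · rintro ⟨j, hj, hr | hr⟩
      · exact ⟨j - x, (mem_solveStep dp x _).2 ⟨j, hj, Or.inl rfl⟩, hr⟩
      · exact ⟨j + x, (mem_solveStep dp x _).2 ⟨j, hj, Or.inr rfl⟩, hr⟩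

theorem mem_foldl_offs (a : List Int) (s : PySem.Set Int) (m : Int) :
    m ∈ a.foldl
      (fun offs x =>
        PySem.Set.union (PySem.Set.ofList (offs.map (fun o => o + x))) (offs.map (fun o => o - x)))
      s ↔ ∃ o ∈ s, reach a o m := by
  induction a generalizing s with
  | nil => simp [reach]
  | cons x rest ih =>
    simp only [List.foldl_cons, ih, reach]
    constructor
    · rintro ⟨k, hk, hr⟩
      rcases (PySem.Set.mem_union ..).1 hk with hk | hk
      · rcases List.mem_map.1 ((PySem.Set.mem_ofList ..).1 hk) with ⟨o, ho, rfl⟩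
        exact ⟨o, ho, Or.inr hr⟩
      · rcases List.mem_map.1 hk with ⟨o, ho, rfl⟩
        exact ⟨o, ho, Or.inl hr⟩
    · rintro ⟨o, ho, hr | hr⟩
      · exact ⟨o - x, (PySem.Set.mem_union ..).2 (Or.inr (List.mem_map.2 ⟨o, ho, rfl⟩)), hr⟩
      · exact ⟨o + x,
          (PySem.Set.mem_union ..).2 (Or.inl ((PySem.Set.mem_ofList ..).2 (List.mem_map.2 ⟨o, ho, rfl⟩))), hr⟩

theorem reach_shift (a : List Int) (c : Int) :
    ∀ (j m : Int), reach a (j + c) (m + c) ↔ reach a j m := by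
  induction a with
  | nil => intro j m; simp [reach]
  | cons x rest ih =>
    intro j m
    have h1 : j + c - x = (j - x) + c := by ring
    have h2 : j + c + x = (j + x) + c := by ring
    simp only [reach, h1, h2, ih]

theorem reach_from_zero (a : List Int) (j m : Int) :
    reach a j m ↔ reach a 0 (m - j) := by
  have := reach_shift a j 0 (m - j)
  simpa using this

-- ===== VERDICT (by name: the statement is the Claim_ definition above) =====
theorem solve_spec : Claim_equal_solve := by
  intro a dp G _
  unfold Spec_solve solve solve_alt
  rw [Bool.eq_iff_iff]
  simp only [decide_eq_true_eq, List.any_eq_true, mem_foldl_solveStep, mem_foldl_offs,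
    PySem.Set.mem_ofList, List.mem_singleton]
  constructor
  · rintro ⟨j, hj, h⟩
    exact ⟨j, hj, 0, rfl, (reach_from_zero a j G).1 h⟩
  · rintro ⟨j, hj, o, rfl, h⟩
    exact ⟨j, hj, (reach_from_zero a j G).2 h⟩
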